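-- pv_equiv track=rewrite | github.com/Lemon1903/CalorAide | Controller/home_screen.py | remove_food_duplicates
-- ===== SOURCE A (Python) =====
-- def remove_food_duplicates(foods, calories):
--     merged_foods = []
--     merged_calories = []
--
--     for food, calorie in zip(foods, calories):
--         food = food.capitalize()
--         if food not in merged_foods:
--             merged_foods.append(food)
--             merged_calories.append(calorie)
--         else:
--             index = merged_foods.index(food)
--             merged_calories[index] += calorie
--
--     return merged_foods, merged_calories
-- ===== SOURCE B (Python) =====
-- def remove_food_duplicates(foods, calories):
--     pairs = [(food.capitalize(), calorie) for food, calorie in zip(foods, calories)]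
--     merged_foods = []
--     for name, _ in pairs:
--         if name not in merged_foods:
--             merged_foods.append(name)
--     merged_calories = [sum(c for n, c in pairs if n == name) for name in merged_foods]
--     return merged_foods, merged_calories
-- ===== Notes on version B (the rewrite author's own statement) =====
-- stated objective: alternative
-- what changed: A interleaves dedup and aggregation in one pass, mutating merged_calories via list.index; B is staged: it materialises the capitalized pairs, collects the unique names in a first pass, then computes each total by a separate re-scan of the pairs per unique name.
import Mathlib
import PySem

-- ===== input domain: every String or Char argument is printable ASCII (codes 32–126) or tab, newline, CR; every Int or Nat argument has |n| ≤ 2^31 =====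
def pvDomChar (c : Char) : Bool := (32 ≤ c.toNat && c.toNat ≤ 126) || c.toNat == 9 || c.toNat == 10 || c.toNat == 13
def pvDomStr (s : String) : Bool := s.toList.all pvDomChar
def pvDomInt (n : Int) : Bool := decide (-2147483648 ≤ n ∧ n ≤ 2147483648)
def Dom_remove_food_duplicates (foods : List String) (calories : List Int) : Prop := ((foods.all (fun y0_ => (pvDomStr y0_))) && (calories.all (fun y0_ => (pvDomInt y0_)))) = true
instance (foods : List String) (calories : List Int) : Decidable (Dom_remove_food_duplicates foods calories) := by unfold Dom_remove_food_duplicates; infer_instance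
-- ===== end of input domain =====

-- B replaces A's single interleaved pass (dedup + mutate merged_calories via list.index) by staged
-- passes: build capitalized pairs, collect unique names, then re-scan the pairs to total each name;
-- objective: alternative (same cost, different decomposition).

-- str.capitalize(): first char uppercased, rest lowercased (exact on ASCII; ported by hand, no PySem primitive)
def pyCapitalize (s : String) : String :=
  match s.toList with
  | [] => ""
  | c :: rest => String.ofList (PySem.Chars.upperChar c :: PySem.Chars.lower rest)

-- ===== PORT A =====
def remove_food_duplicates (foods : List String) (calories : List Int) : List String × List Int :=
  (foods.zip calories).foldl
    (fun st fc =>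
      let food := pyCapitalize fc.1
      if food ∉ st.1 then
        (st.1 ++ [food], st.2 ++ [fc.2])
      else
        match PySem.List.index? st.1 food with
        | some i => (st.1, st.2.modify i (· + fc.2))
        | none => (st.1, st.2))   -- unreachable: food ∈ st.1
    ([], [])

-- ===== PORT B =====
def remove_food_duplicates_alt (foods : List String) (calories : List Int) : List String × List Int :=
  let pairs := (foods.zip calories).map (fun fc => (pyCapitalize fc.1, fc.2))
  let merged_foods := pairs.foldl (fun acc p => if p.1 ∈ acc then acc else acc ++ [p.1]) []
  let merged_calories := merged_foods.map
    (fun name => (pairs.filter (fun p => p.1 == name)).foldl (fun s p => s + p.2) 0)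
  (merged_foods, merged_calories)

-- ===== PRECONDITION & SPEC =====
def Spec_remove_food_duplicates (foods : List String) (calories : List Int) (out : List String × List Int) : Prop := out = remove_food_duplicates_alt foods calories
instance (foods : List String) (calories : List Int) (out : List String × List Int) : Decidable (Spec_remove_food_duplicates foods calories out) := by unfold Spec_remove_food_duplicates; infer_instance

-- ===== CLAIM (what is proved, stated in full; the proofs are below) =====
def Claim_equal_remove_food_duplicates : Prop := ∀ (foods : List String) (calories : List Int), Dom_remove_food_duplicates foods calories → Spec_remove_food_duplicates foods calories (remove_food_duplicates foods calories)

-- ===== LEMMAS AND PROOFS =====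

-- B's dedup pass (proof-side name for the port's first fold)
def pvU (ps : List (String × Int)) : List String :=
  ps.foldl (fun acc p => if p.1 ∈ acc then acc else acc ++ [p.1]) []

-- B's per-name re-scan total (proof-side name for the port's second pass)
def pvS (ps : List (String × Int)) (n : String) : Int :=
  (ps.filter (fun p => p.1 == n)).foldl (fun s p => s + p.2) 0

lemma pvU_append (ps : List (String × Int)) (x : String × Int) :
    pvU (ps ++ [x]) = if x.1 ∈ pvU ps then pvU ps else pvU ps ++ [x.1] := by
  simp [pvU, List.foldl_append]

lemma pvS_append (ps : List (String × Int)) (x : String × Int) (n : String) :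
    pvS (ps ++ [x]) n = if x.1 = n then pvS ps n + x.2 else pvS ps n := by
  by_cases h : x.1 = n <;> simp [pvS, List.filter_append, List.foldl_append, h]

lemma mem_pvU (ps : List (String × Int)) (a : String) :
    a ∈ pvU ps ↔ a ∈ ps.map Prod.fst := by
  induction ps using List.reverseRecOn with
  | nil => simp [pvU]
  | append_singleton ps x ih =>
    rw [pvU_append]
    by_cases h : x.1 ∈ pvU ps
    · rw [if_pos h, ih]
      simp only [List.map_append, List.mem_append, List.map_cons, List.map_nil, List.mem_singleton]
      exact ⟨Or.inl, fun hc => hc.elim id (fun he => by subst he; exact ih.mp h)⟩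
    · rw [if_neg h]
      simp only [List.mem_append, List.mem_singleton, ih, List.map_append, List.map_cons,
        List.map_nil]

lemma nodup_pvU (ps : List (String × Int)) : (pvU ps).Nodup := by
  induction ps using List.reverseRecOn with
  | nil => simp [pvU]
  | append_singleton ps x ih =>
    rw [pvU_append]
    by_cases h : x.1 ∈ pvU ps
    · simpa [h] using ih
    · rw [if_neg h]
      refine List.Nodup.append ih (List.nodup_singleton _) ?_
      intro a ha hb
      rw [List.mem_singleton] at hb
      exact h (hb ▸ ha)

lemma pvS_of_not_mem (ps : List (String × Int)) (a : String)
    (h : a ∉ ps.map Prod.fst) : pvS ps a = 0 := by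
  have hf : ps.filter (fun p => p.1 == a) = [] := by
    rw [List.filter_eq_nil_iff]
    intro p hp
    simp only [beq_iff_eq]
    intro he
    exact h (List.mem_map.mpr ⟨p, hp, he⟩)
  simp [pvS, hf]

lemma fold_eq (ps : List (String × Int)) :
    ps.foldl
      (fun st p =>
        if p.1 ∉ st.1 then
          (st.1 ++ [p.1], st.2 ++ [p.2])
        else
          match PySem.List.index? st.1 p.1 with
          | some i => (st.1, st.2.modify i (· + p.2))
          | none => (st.1, st.2))
      (([] : List String), ([] : List Int))
    = (pvU ps, (pvU ps).map (pvS ps)) := by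
  induction ps using List.reverseRecOn with
  | nil => simp [pvU]
  | append_singleton ps x ih =>
    rw [List.foldl_append, ih]
    by_cases h : x.1 ∈ pvU ps
    · -- duplicate name: A mutates at list.index; B's per-name re-scan totals absorb x
      obtain ⟨i, hi⟩ : ∃ i, PySem.List.index? (pvU ps) x.1 = some i := by
        have := (PySem.List.index?_isSome_iff (xs := pvU ps) (v := x.1)).mpr h
        exact Option.isSome_iff_exists.mp this
      obtain ⟨hlt, hget, _⟩ := PySem.List.getElem_of_index?_eq_some hi
      simp only [List.foldl_cons, List.foldl_nil, h, not_true_eq_false, if_false, hi]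
      rw [pvU_append, if_pos h]
      refine Prod.ext rfl ?_
      apply List.ext_getElem
      · simp
      · intro j h1 h2
        have hjlen : j < (pvU ps).length := by simpa using h2
        have hnd := nodup_pvU ps
        rw [List.getElem_modify]
        simp only [List.getElem_map, pvS_append]
        by_cases hij : i = j
        · subst hij
          simp [hget]
        · have hne : x.1 ≠ (pvU ps)[j] := by
            intro he
            exact hij (hnd.getElem_inj_iff.mp (hget.trans he))
          simp [hij, hne]
    · -- new name: both append
      simp only [List.foldl_cons, List.foldl_nil, h, not_false_eq_true, if_true]
      rw [pvU_append, if_neg h]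
      refine Prod.ext rfl ?_
      have hmap : (pvU ps).map (pvS (ps ++ [x])) = (pvU ps).map (pvS ps) := by
        apply List.map_congr_left
        intro a ha
        rw [pvS_append]
        have hne : x.1 ≠ a := fun he => h (he ▸ ha)
        simp [hne]
      have hx : pvS (ps ++ [x]) x.1 = x.2 := by
        rw [pvS_append, if_pos rfl,
          pvS_of_not_mem ps x.1 (fun hm => h ((mem_pvU ps x.1).mpr hm))]
        ring
      simp [hmap, hx]

lemma alt_eq (foods : List String) (calories : List Int) :
    remove_food_duplicates_alt foods calories
    = (pvU ((foods.zip calories).map (fun fc => (pyCapitalize fc.1, fc.2))),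
       (pvU ((foods.zip calories).map (fun fc => (pyCapitalize fc.1, fc.2)))).map
         (pvS ((foods.zip calories).map (fun fc => (pyCapitalize fc.1, fc.2))))) := rfl

-- ===== VERDICT (by name: the statement is the Claim_ definition above) =====
theorem remove_food_duplicates_spec : Claim_equal_remove_food_duplicates := by
  intro foods calories _
  unfold Spec_remove_food_duplicates remove_food_duplicates
  rw [alt_eq]
  have h := fold_eq ((foods.zip calories).map (fun fc => (pyCapitalize fc.1, fc.2)))
  rw [List.foldl_map] at h
  exact h
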